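-- pv_equiv track=rewrite | github.com/pahorema/ProgLab24Feb | esame.py | hourly_trend_changes
-- ===== SOURCE A (Python) =====
-- class ExamException(Exception):
--         pass
--
-- def hourly_trend_changes(time_series):
--     timeSeriesIsNotListException_str = "Oops, time_series deve essere una lista"
--
--     if type(time_series) is not list:
--         raise ExamException(timeSeriesIsNotListException_str)
--
--     if(len(time_series) == 0):
--         return time_series          #Se non c'è nessun valore non ci sarà nessuna inversione
--     if(len(time_series) == 1):
--         return [0]                  #Non ci sono inversioni se la lista ha solo un valore
--
--     for line in time_series:        #Converto tutti gli epoch in ore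
--         line[0] = line[0]//3600
--
--
--     ora_precedente = -1             #Ora utilizzata nel ciclo precedente
--     crescita = False                #Tiene conto dell'aumento della temperatura
--     returnValue = []                #Lista contenente il numero di inversioni
--
--     for indice, time in enumerate(time_series[:-1]):
--         if(ora_precedente != time_series[indice+1][0]):   #Controllo se sono nella stessa ora del ciclo precedente
--             returnValue.append(0)                         #Aggiungo 0 alla lista delle inversioni
--         ora_precedente = time_series[indice+1][0]
--
--         if(time[1] > time_series[indice+1][1]):          #La temperatura sta scendendo?
--             if(crescita):                                #Controllo per un inversione
--                 returnValue[-1] += 1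
--             crescita = False
--         if(time[1] < time_series[indice+1][1]):          #La temperatura sta aumentando?
--             if (not crescita and indice != 0):
--                 returnValue[-1] += 1
--             crescita = True
--
--     return returnValue
-- ===== SOURCE B (Python) =====
-- class ExamException(Exception):
--     pass
--
-- # Multi-pass re-implementation: sign table + trend-state scan + reversal flags,
-- # then group-sum by the hour of each pair's second element.
-- # Like A, it converts line[0] to hours IN PLACE; equivalence is about the return value.
-- def hourly_trend_changes(time_series):
--     if type(time_series) is not list:
--         raise ExamException("Oops, time_series deve essere una lista")
--     if len(time_series) == 0:
--         return time_series
--     if len(time_series) == 1: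
--         return [0]
--
--     for row in time_series:
--         row[0] = row[0] // 3600
--
--     temps = [row[1] for row in time_series]
--     # sign of each consecutive step: +1 rising, -1 falling, 0 flat
--     signs = [(temps[i + 1] > temps[i]) - (temps[i + 1] < temps[i])
--              for i in range(len(temps) - 1)]
--
--     # trend state BEFORE each step: last non-zero sign so far was positive
--     rising = []
--     cur = False
--     for s in signs:
--         rising.append(cur)
--         if s != 0:
--             cur = s > 0
--
--     # 1 where the trend reverses (the very first rising step never counts)
--     rev = [1 if (s < 0 and r) or (s > 0 and not r and i != 0) else 0
--            for i, (s, r) in enumerate(zip(signs, rising))]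
--
--     # sum per hour-group, keyed by the hour of the pair's SECOND element
--     hours = [row[0] for row in time_series]
--     out, prev = [], None
--     for i, c in enumerate(rev):
--         if hours[i + 1] != prev:
--             out.append(0)
--             prev = hours[i + 1]
--         out[-1] += c
--     return out
-- ===== Notes on version B (the rewrite author's own statement) =====
-- stated objective: alternative
-- what changed: A's single stateful loop (hour sentinel, trend flag and bucket list all mutated in one pass) is decomposed into separate passes: a sign table over consecutive pairs, a trend-state scan, per-pair reversal flags, and a final group-sum of the flags keyed by the next element's hour with a None (not -1) previous-hour marker.
-- outside the precondition, e.g. on hourly_trend_changes([[-3600, 5], [-3500, 3], [5000, 7]]): A returns [1], B returns [0, 1]; on hourly_trend_changes([[-3600, 5], [-3500, 3], [-3400, 7], [0, 2]]): A raises IndexError, B returns [1, 1]; on hourly_trend_changes([[3600, 5], [7000]]): A raises IndexError, B raises IndexError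
import Mathlib
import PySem

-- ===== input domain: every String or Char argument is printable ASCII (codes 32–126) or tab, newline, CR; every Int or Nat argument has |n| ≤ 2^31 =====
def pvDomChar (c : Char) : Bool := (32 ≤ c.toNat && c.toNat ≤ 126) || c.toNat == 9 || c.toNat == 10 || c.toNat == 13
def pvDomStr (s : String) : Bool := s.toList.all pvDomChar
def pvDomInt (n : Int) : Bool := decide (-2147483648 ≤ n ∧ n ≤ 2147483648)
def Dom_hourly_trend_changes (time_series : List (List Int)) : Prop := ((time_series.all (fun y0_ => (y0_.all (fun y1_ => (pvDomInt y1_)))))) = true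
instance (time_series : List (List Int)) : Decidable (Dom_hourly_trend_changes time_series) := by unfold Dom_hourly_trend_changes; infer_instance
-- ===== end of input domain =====

-- B re-implements A's single stateful loop as map-based passes (sign table, trend scan,
-- reversal flags, group-sum by hour); objective: alternative decomposition, not speed.
-- Like A, the Python B mutates line[0] in place; the equivalence proved is about the return value.

-- ===== PORT A =====
-- ret[-1] += 1 on the REVERSED accumulator (Python appends at the end; we cons at the head)
def pvIncLast (l : List Int) : List Int :=
  match l with
  | [] => []
  | h :: t => (h + 1) :: t

def hourly_trend_changes (time_series : List (List Int)) : List Int :=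
  if time_series.length = 0 then []
  else if time_series.length = 1 then [0]
  else
    -- for line in time_series: line[0] = line[0] // 3600  (in-place; rebuilt functionally)
    let ts := time_series.map (fun line =>
      match line with
      | t :: rest => PySem.Int.floordiv t 3600 :: rest
      | [] => [])          -- Python raises IndexError on an empty row; Pre_ excludes it
    let st := (PySem.List.enumerate (PySem.List.slice ts none (some (-1)))).foldl
      (fun (st : Int × Bool × List Int) p =>
        let ora_precedente := st.1
        let crescita := st.2.1
        let ret := st.2.2
        let indice := p.1
        let time := p.2
        let nxt := (PySem.List.pyGet? ts (indice + 1)).getD []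
        let ret := if ora_precedente ≠ PySem.List.pyGetD nxt 0 0 then 0 :: ret else ret
        let ora_precedente := PySem.List.pyGetD nxt 0 0
        let cr₁ := if PySem.List.pyGetD time 1 0 > PySem.List.pyGetD nxt 1 0 then false else crescita
        let ret := if PySem.List.pyGetD time 1 0 > PySem.List.pyGetD nxt 1 0 then
                     (if crescita then pvIncLast ret else ret) else ret
        let cr₂ := if PySem.List.pyGetD time 1 0 < PySem.List.pyGetD nxt 1 0 then true else cr₁
        let ret := if PySem.List.pyGetD time 1 0 < PySem.List.pyGetD nxt 1 0 then
                     (if ¬ cr₁ ∧ indice ≠ 0 then pvIncLast ret else ret) else ret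
        (ora_precedente, cr₂, ret))
      (-1, false, [])
    st.2.2.reverse

-- ===== PORT B =====
-- out[-1] += c on the REVERSED accumulator
def pvAddLast (l : List Int) (c : Int) : List Int :=
  match l with
  | [] => []
  | h :: t => (h + c) :: t

def hourly_trend_changes_alt (time_series : List (List Int)) : List Int :=
  if time_series.length = 0 then []
  else if time_series.length = 1 then [0]
  else
    let ts := time_series.map (fun row =>
      match row with
      | t :: rest => PySem.Int.floordiv t 3600 :: rest
      | [] => [])
    let temps := ts.map (fun row => PySem.List.pyGetD row 1 0)
    let signs := (PySem.List.pyRange 0 ((temps.length : Int) - 1) 1).map (fun i =>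
      (if PySem.List.pyGetD temps (i + 1) 0 > PySem.List.pyGetD temps i 0 then (1 : Int) else 0)
      - (if PySem.List.pyGetD temps (i + 1) 0 < PySem.List.pyGetD temps i 0 then (1 : Int) else 0))
    let rising := (signs.foldl
      (fun (acc : List Bool × Bool) s =>
        (acc.2 :: acc.1, if s ≠ 0 then decide (0 < s) else acc.2)) ([], false)).1.reverse
    let rev := (PySem.List.enumerate (signs.zip rising)).map (fun p =>
      if (p.2.1 < 0 ∧ p.2.2) ∨ (0 < p.2.1 ∧ ¬ p.2.2 ∧ p.1 ≠ 0) then (1 : Int) else 0)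
    let hours := ts.map (fun row => PySem.List.pyGetD row 0 0)
    let st := (PySem.List.enumerate rev).foldl
      (fun (acc : List Int × Option Int) p =>
        let op := if some (PySem.List.pyGetD hours (p.1 + 1) 0) ≠ acc.2
                  then (0 :: acc.1, some (PySem.List.pyGetD hours (p.1 + 1) 0)) else acc
        (pvAddLast op.1 p.2, op.2)) ([], none)
    st.1.reverse

-- ===== PRECONDITION & SPEC =====
-- Pre_ excludes (a) series (of length ≥ 2) containing a row with fewer than 2 entries, on which
-- the Python A raises IndexError, and (b) series whose SECOND timestamp falls in hour -1
-- (line[0]//3600 == -1), where A's 'ora_precedente = -1' sentinel accidentally suppresses the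
-- first hour-bucket (a short list, or an IndexError on 'returnValue[-1]').
def Pre_hourly_trend_changes (time_series : List (List Int)) : Prop :=
  time_series.length ≤ 1 ∨
  ((∀ row ∈ time_series, 2 ≤ row.length) ∧
   ∀ row ∈ (time_series.drop 1).take 1, PySem.Int.floordiv (row.getD 0 0) 3600 ≠ -1)

instance (time_series : List (List Int)) : Decidable (Pre_hourly_trend_changes time_series) := by
  unfold Pre_hourly_trend_changes; infer_instance

def pvWitness_hourly_trend_changes : List (List Int) := [[3600, 5], [7000, 3], [11000, 7]]

def Spec_hourly_trend_changes (time_series : List (List Int)) (out : List Int) : Prop :=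
  out = hourly_trend_changes_alt time_series
instance (time_series : List (List Int)) (out : List Int) : Decidable (Spec_hourly_trend_changes time_series out) := by
  unfold Spec_hourly_trend_changes; infer_instance

-- ===== CLAIM (what is proved, stated in full; the proofs are below) =====
def Claim_equal_hourly_trend_changes : Prop := ∀ (time_series : List (List Int)), Dom_hourly_trend_changes time_series → Pre_hourly_trend_changes time_series → Spec_hourly_trend_changes time_series (hourly_trend_changes time_series)

-- ===== LEMMAS AND PROOFS =====

-- proof-side abstractions: hour / temperature / step-sign of the CONVERTED list, as functions of the index
def pvH (ts : List (List Int)) (k : Nat) : Int := PySem.List.pyGetD (ts.getD k []) 0 0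
def pvT (ts : List (List Int)) (k : Nat) : Int := PySem.List.pyGetD (ts.getD k []) 1 0
def pvS (ts : List (List Int)) (k : Nat) : Int :=
  (if pvT ts (k + 1) > pvT ts k then (1 : Int) else 0)
  - (if pvT ts (k + 1) < pvT ts k then (1 : Int) else 0)
-- B's trend state before step k (last non-zero sign so far was positive)
def pvCB (ts : List (List Int)) : Nat → Bool
  | 0 => false
  | k + 1 => if pvS ts k ≠ 0 then decide (0 < pvS ts k) else pvCB ts k

-- A's loop body and B's (fused) loop body, as step functions over the Nat index
def pvStepA (ts : List (List Int)) (st : Int × Bool × List Int) (k : Nat) : Int × Bool × List Int :=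
  let ret := if st.1 ≠ pvH ts (k + 1) then 0 :: st.2.2 else st.2.2
  let cr₁ := if pvT ts k > pvT ts (k + 1) then false else st.2.1
  let ret := if pvT ts k > pvT ts (k + 1) then (if st.2.1 then pvIncLast ret else ret) else ret
  let cr₂ := if pvT ts k < pvT ts (k + 1) then true else cr₁
  let ret := if pvT ts k < pvT ts (k + 1) then
               (if ¬ cr₁ ∧ (k : Int) ≠ 0 then pvIncLast ret else ret) else ret
  (pvH ts (k + 1), cr₂, ret)

def pvStepB (ts : List (List Int)) (acc : List Int × Option Int) (k : Nat) : List Int × Option Int :=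
  let op := if some (pvH ts (k + 1)) ≠ acc.2 then (0 :: acc.1, some (pvH ts (k + 1))) else acc
  (pvAddLast op.1
    (if (pvS ts k < 0 ∧ pvCB ts k) ∨ (0 < pvS ts k ∧ ¬ pvCB ts k ∧ (k : Int) ≠ 0) then 1 else 0),
   op.2)

lemma pvAddLast_zero (l : List Int) : pvAddLast l 0 = l := by
  cases l <;> simp [pvAddLast]

lemma pvAddLast_one (l : List Int) : pvAddLast l 1 = pvIncLast l := by
  cases l <;> simp [pvAddLast, pvIncLast]

-- one synced step: B's step mirrors A's step (and A's new trend state is pvCB (k+1))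
lemma pvStep_agree (ts : List (List Int)) (k : Nat) (ora : Int) (out : List Int) :
    pvStepB ts (out, some ora) k
      = ((pvStepA ts (ora, pvCB ts k, out) k).2.2, some (pvStepA ts (ora, pvCB ts k, out) k).1)
    ∧ (pvStepA ts (ora, pvCB ts k, out) k).2.1 = pvCB ts (k + 1) := by
  have hCB : pvCB ts (k + 1) = if pvS ts k ≠ 0 then decide (0 < pvS ts k) else pvCB ts k := rfl
  rcases lt_trichotomy (pvT ts k) (pvT ts (k + 1)) with hlt | heq | hgt
  · have hS : pvS ts k = 1 := by simp [pvS, hlt, not_lt.mpr hlt.le]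
    refine ⟨?_, ?_⟩ <;>
      simp only [pvStepA, pvStepB, hCB, hS, hlt, not_lt.mpr hlt.le] <;>
      split_ifs <;>
      first
        | rfl
        | simp_all [pvAddLast_zero, pvAddLast_one]
  · have hS : pvS ts k = 0 := by simp [pvS, heq]
    refine ⟨?_, ?_⟩ <;>
      simp only [pvStepA, pvStepB, hCB, hS, heq, gt_iff_lt] <;>
      split_ifs <;>
      first
        | rfl
        | simp_all [pvAddLast_zero, pvAddLast_one]
  · have hS : pvS ts k = -1 := by simp [pvS, hgt, not_lt.mpr hgt.le]
    refine ⟨?_, ?_⟩ <;>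
      simp only [pvStepA, pvStepB, hCB, hS, hgt, not_lt.mpr hgt.le] <;>
      split_ifs <;>
      first
        | rfl
        | simp_all [pvAddLast_zero, pvAddLast_one]

-- synced states stay synced along any run
lemma pvSync (ts : List (List Int)) :
    ∀ (j k : Nat) (ora : Int) (out : List Int),
      (List.range' k j).foldl (pvStepB ts) (out, some ora)
        = (((List.range' k j).foldl (pvStepA ts) (ora, pvCB ts k, out)).2.2,
           some ((List.range' k j).foldl (pvStepA ts) (ora, pvCB ts k, out)).1) := by
  intro j
  induction j with
  | zero => intro k ora out; simp
  | succ j ih =>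
    intro k ora out
    rw [List.range'_succ, List.foldl_cons, List.foldl_cons]
    obtain ⟨hstep, hcr⟩ := pvStep_agree ts k ora out
    rw [hstep]
    have := ih (k + 1) (pvStepA ts (ora, pvCB ts k, out) k).1
      (pvStepA ts (ora, pvCB ts k, out) k).2.2
    rw [this, ← hcr]

-- A's port computes the pvStepA fold
lemma pvA_norm (time_series : List (List Int)) (h2 : 2 ≤ time_series.length) :
    hourly_trend_changes time_series
      = (let ts := time_series.map (fun line =>
           match line with
           | t :: rest => PySem.Int.floordiv t 3600 :: rest
           | [] => []);
         ((List.range (time_series.length - 1)).foldl (pvStepA ts) (-1, false, [])).2.2.reverse) := by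
  simp only [hourly_trend_changes]
  rw [if_neg (by omega), if_neg (by omega)]
  set n := time_series.length with hn
  set ts := time_series.map (fun line =>
    match line with
    | t :: rest => PySem.Int.floordiv t 3600 :: rest
    | [] => []) with hts
  have hlen : ts.length = n := by rw [hts, List.length_map]
  have hdl : ts.dropLast.length = n - 1 := by simp [hlen]
  rw [PySem.List.slice_to_neg_one,
      PySem.List.enumerate_eq_map_pyRange _ ([] : List Int)]
  have hlen2 : PySem.List.len ts.dropLast = ((n - 1 : Nat) : Int) := by
    simp [PySem.List.len, hdl]
  rw [hlen2, PySem.List.pyRange_zero_natCast, List.foldl_map, List.foldl_map]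
  apply congrArg (fun st : Int × Bool × List Int => st.2.2.reverse)
  apply PySem.List.foldl_congr_mem
  intro acc k hk
  have hk' : k < n - 1 := List.mem_range.mp hk
  have h1 : PySem.List.pyGetD ts.dropLast (↑k) [] = ts.getD k [] := by
    rw [PySem.List.pyGetD_natCast,
        List.getD_eq_getElem _ _ (by omega : k < ts.dropLast.length),
        List.getElem_dropLast, List.getD_eq_getElem _ _ (by omega : k < ts.length)]
  have h2 : PySem.List.pyGet? ts ((k : Int) + 1) = some (ts.getD (k + 1) []) := by
    have : ((k : Int) + 1) = ((k + 1 : Nat) : Int) := by push_cast; ring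
    rw [this, PySem.List.pyGet?_natCast,
        List.getElem?_eq_getElem (by omega : k + 1 < ts.length),
        List.getD_eq_getElem _ _ (by omega : k + 1 < ts.length)]
  simp only [pvStepA, pvH, pvT, h1, h2, Option.getD_some]
  rfl

-- the 'rising' scan emits B's trend state pvCB at every index
lemma pvRising (ts : List (List Int)) (j : Nat) :
    ∀ (k : Nat) (acc : List Bool),
      ((List.range' k j).map (pvS ts)).foldl
        (fun (a : List Bool × Bool) s => (a.2 :: a.1, if s ≠ 0 then decide (0 < s) else a.2))
        (acc, pvCB ts k)
      = (((List.range' k j).map (pvCB ts)).reverse ++ acc, pvCB ts (k + j)) := by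
  induction j with
  | zero => intro k acc; simp
  | succ j ih =>
    intro k acc
    rw [List.range'_succ, List.map_cons, List.foldl_cons]
    have hstep : ((acc, pvCB ts k).2 :: (acc, pvCB ts k).1,
        if pvS ts k ≠ 0 then decide (0 < pvS ts k) else (acc, pvCB ts k).2)
        = (pvCB ts k :: acc, pvCB ts (k + 1)) := rfl
    rw [hstep, ih (k + 1) (pvCB ts k :: acc), show k + (j + 1) = k + 1 + j by omega]
    simp [List.append_assoc]

-- B's port computes the pvStepB fold
lemma pvB_norm (time_series : List (List Int)) (h2 : 2 ≤ time_series.length) :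
    hourly_trend_changes_alt time_series
      = (let ts := time_series.map (fun line =>
           match line with
           | t :: rest => PySem.Int.floordiv t 3600 :: rest
           | [] => []);
         ((List.range (time_series.length - 1)).foldl (pvStepB ts) ([], none)).1.reverse) := by
  simp only [hourly_trend_changes_alt]
  rw [if_neg (by omega), if_neg (by omega)]
  set n := time_series.length with hn
  set ts := time_series.map (fun line =>
    match line with
    | t :: rest => PySem.Int.floordiv t 3600 :: rest
    | [] => []) with hts
  have hlen : ts.length = n := by rw [hts, List.length_map]
  set temps := ts.map (fun row => PySem.List.pyGetD row 1 0) with htemps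
  set hours := ts.map (fun row => PySem.List.pyGetD row 0 0) with hhours
  have htl : temps.length = n := by rw [htemps, List.length_map, hlen]
  -- signs = map (pvS ts) (range (n-1))
  have hcast : ((temps.length : Int) - 1) = ((n - 1 : Nat) : Int) := by
    rw [htl]; have : 1 ≤ n := by omega
    push_cast [this]; ring
  have hsigns : (PySem.List.pyRange 0 ((temps.length : Int) - 1) 1).map (fun i =>
      (if PySem.List.pyGetD temps (i + 1) 0 > PySem.List.pyGetD temps i 0 then (1 : Int) else 0)
      - (if PySem.List.pyGetD temps (i + 1) 0 < PySem.List.pyGetD temps i 0 then (1 : Int) else 0))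
      = (List.range (n - 1)).map (pvS ts) := by
    rw [hcast, PySem.List.pyRange_zero_natCast, List.map_map]
    apply List.map_congr_left
    intro k hk
    have hk' : k < n - 1 := List.mem_range.mp hk
    have e1 : ∀ (j : Nat), j < n → PySem.List.pyGetD temps (j : Int) 0 = pvT ts j := by
      intro j hj
      rw [PySem.List.pyGetD_natCast, htemps,
          List.getD_eq_getElem _ _ (by simp [hlen]; omega), List.getElem_map]
      unfold pvT
      rw [List.getD_eq_getElem _ _ (by omega : j < ts.length)]
    have e2 : ((k : Int) + 1) = ((k + 1 : Nat) : Int) := by push_cast; ring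
    simp only [Function.comp_apply, e2, e1 k (by omega), e1 (k + 1) (by omega), pvS]
  rw [hsigns]
  -- rising = map (pvCB ts) (range (n-1))
  have hrise := pvRising ts (n - 1) 0 []
  rw [← List.range_eq_range'] at hrise
  simp only [show pvCB ts 0 = false from rfl] at hrise
  rw [hrise]
  simp only [List.append_nil, List.reverse_reverse]
  -- zip of two maps over the same range
  rw [List.zip_map']
  -- rev = map over range of the flag function
  have hlen3 : PySem.List.len ((List.range (n - 1)).map (fun a => (pvS ts a, pvCB ts a)))
      = ((n - 1 : Nat) : Int) := by simp [PySem.List.len]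
  rw [PySem.List.enumerate_eq_map_pyRange _ ((0 : Int), false), hlen3,
      PySem.List.pyRange_zero_natCast, List.map_map, List.map_map]
  have hrev : (List.range (n - 1)).map (((fun p : Int × Int × Bool =>
        if (p.2.1 < 0 ∧ p.2.2) ∨ (0 < p.2.1 ∧ ¬ p.2.2 ∧ p.1 ≠ 0) then (1 : Int) else 0)
        ∘ (fun j => (j, PySem.List.pyGetD ((List.range (n - 1)).map (fun a => (pvS ts a, pvCB ts a))) j (0, false))))
        ∘ (fun k : Nat => (k : Int)))
      = (List.range (n - 1)).map (fun k : Nat =>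
          if (pvS ts k < 0 ∧ pvCB ts k) ∨ (0 < pvS ts k ∧ ¬ pvCB ts k ∧ (k : Int) ≠ 0)
          then (1 : Int) else 0) := by
    apply List.map_congr_left
    intro k hk
    have hk' : k < n - 1 := List.mem_range.mp hk
    simp only [Function.comp_apply, PySem.List.pyGetD_natCast,
      PySem.List.getD_map_range _ _ _ _ hk']
  rw [hrev]
  -- final fold
  have hlen4 : PySem.List.len ((List.range (n - 1)).map (fun k : Nat =>
      if (pvS ts k < 0 ∧ pvCB ts k) ∨ (0 < pvS ts k ∧ ¬ pvCB ts k ∧ (k : Int) ≠ 0)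
      then (1 : Int) else 0)) = ((n - 1 : Nat) : Int) := by simp [PySem.List.len]
  rw [PySem.List.enumerate_eq_map_pyRange _ (0 : Int), hlen4,
      PySem.List.pyRange_zero_natCast, List.foldl_map, List.foldl_map]
  apply congrArg (fun st : List Int × Option Int => st.1.reverse)
  apply PySem.List.foldl_congr_mem
  intro acc k hk
  have hk' : k < n - 1 := List.mem_range.mp hk
  have e3 : PySem.List.pyGetD hours ((k : Int) + 1) 0 = pvH ts (k + 1) := by
    have e2 : ((k : Int) + 1) = ((k + 1 : Nat) : Int) := by push_cast; ring
    rw [e2, PySem.List.pyGetD_natCast, hhours,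
        List.getD_eq_getElem _ _ (by simp [hlen]; omega), List.getElem_map]
    unfold pvH
    rw [List.getD_eq_getElem _ _ (by omega : k + 1 < ts.length)]
  simp only [PySem.List.pyGetD_natCast, PySem.List.getD_map_range _ _ _ _ hk', e3, pvStepB]

-- ===== VERDICT (by name: the statement is the Claim_ definition above) =====
theorem hourly_trend_changes_spec : Claim_equal_hourly_trend_changes := by
  intro time_series _hdom hpre
  unfold Spec_hourly_trend_changes
  by_cases h0 : time_series.length = 0
  · simp [hourly_trend_changes, hourly_trend_changes_alt, h0]
  · by_cases h1 : time_series.length = 1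
    · simp [hourly_trend_changes, hourly_trend_changes_alt, h1]
    · have h2 : 2 ≤ time_series.length := by omega
      rcases hpre with hle | ⟨hrows, hH1⟩
      · omega
      rw [pvA_norm _ h2, pvB_norm _ h2]
      simp only
      set ts := time_series.map (fun line =>
        match line with
        | t :: rest => PySem.Int.floordiv t 3600 :: rest
        | [] => []) with hts
      -- the second element's hour is not the -1 sentinel
      have hH : pvH ts 1 ≠ -1 := by
        match time_series, h2 with
        | r0 :: r1 :: rest, _ =>
          have hr1 : 2 ≤ r1.length := hrows r1 (by simp)
          match r1, hr1 with
          | t :: tl, _ =>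
            have := hH1 (t :: tl) (by simp)
            simpa [hts, pvH, PySem.List.pyGetD_zero_cons] using this
      have hne : ((-1 : Int) ≠ pvH ts 1) := fun e => hH e.symm
      have hA0 : pvStepA ts (-1, false, []) 0 = (pvH ts 1, pvCB ts 1, [0]) := by
        have hc1 : pvCB ts 1 = if pvS ts 0 ≠ 0 then decide (0 < pvS ts 0) else false := rfl
        rcases lt_trichotomy (pvT ts 0) (pvT ts 1) with hlt | heq | hgt
        · have hS : pvS ts 0 = 1 := by simp [pvS, hlt, not_lt.mpr hlt.le]
          simp [pvStepA, hne, hlt, not_lt.mpr hlt.le, hc1, hS]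
        · have hS : pvS ts 0 = 0 := by simp [pvS, heq]
          simp [pvStepA, hne, heq, hc1, hS]
        · have hS : pvS ts 0 = -1 := by simp [pvS, hgt, not_lt.mpr hgt.le]
          simp [pvStepA, hne, hgt, not_lt.mpr hgt.le, hc1, hS]
      have hB0 : pvStepB ts ([], none) 0 = ([0], some (pvH ts 1)) := by
        simp [pvStepB, show pvCB ts 0 = false from rfl, pvAddLast]
      obtain ⟨j, hj⟩ : ∃ j, time_series.length - 1 = j + 1 := ⟨time_series.length - 2, by omega⟩
      rw [hj, List.range_eq_range', List.range'_succ, List.foldl_cons, List.foldl_cons,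
          Nat.zero_add, hA0, hB0, pvSync ts j 1 (pvH ts 1) [0]]
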